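-- pv_equiv track=rewrite | github.com/braujian565/envctl | envctl/duplicator.py | find_duplicate_keys
-- ===== SOURCE A (Python) =====
-- from collections import defaultdict
-- from typing import Dict, List, Tuple
--
-- def find_duplicate_keys(
--     sets: Dict[str, Dict[str, str]]
-- ) -> Dict[str, List[str]]:
--     """Return keys that appear in more than one set, mapped to list of set names."""
--     key_map: Dict[str, List[str]] = defaultdict(list)
--     for set_name, env in sets.items():
--         for key in env:
--             key_map[key].append(set_name)
--     return {k: names for k, names in key_map.items() if len(names) > 1}
-- ===== SOURCE B (Python) =====
-- def find_duplicate_keys(sets):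
--     """Return keys that appear in more than one set, mapped to list of set names."""
--     keys = dict.fromkeys(k for env in sets.values() for k in env)
--     result = {}
--     for key in keys:
--         names = [name for name, env in sets.items() if key in env]
--         if len(names) > 1:
--             result[key] = names
--     return result
-- ===== Notes on version B (the rewrite author's own statement) =====
-- stated objective: alternative
-- what changed: Replaces A's single grouping pass into a defaultdict with: build the ordered list of distinct keys via dict.fromkeys over all envs, then for each key re-scan the sets to collect the names of sets containing it, keeping keys found in more than one set.
import Mathlib
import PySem

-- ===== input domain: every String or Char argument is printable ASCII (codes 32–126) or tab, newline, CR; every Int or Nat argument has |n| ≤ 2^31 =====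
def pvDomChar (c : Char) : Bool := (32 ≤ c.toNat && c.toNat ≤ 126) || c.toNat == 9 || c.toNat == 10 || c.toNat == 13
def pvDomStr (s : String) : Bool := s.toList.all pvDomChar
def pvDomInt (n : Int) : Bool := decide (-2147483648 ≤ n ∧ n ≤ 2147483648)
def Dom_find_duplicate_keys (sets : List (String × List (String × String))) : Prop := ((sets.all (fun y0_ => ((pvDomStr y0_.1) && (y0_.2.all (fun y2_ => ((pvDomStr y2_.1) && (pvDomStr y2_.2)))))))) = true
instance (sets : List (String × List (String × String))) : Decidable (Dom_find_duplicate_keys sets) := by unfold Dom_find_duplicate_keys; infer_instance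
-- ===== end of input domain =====

-- B builds the distinct-key list first and re-scans the sets per key (alternative decomposition, same results).


-- ===== PORT A =====
def find_duplicate_keys (sets : List (String × List (String × String))) : List (String × List String) :=
  let key_map : PySem.Dict String (List String) :=
    sets.foldl (fun km s =>
      s.2.foldl (fun km kv => km.modify kv.1 [] (fun l => l ++ [s.1])) km) PySem.Dict.empty
  key_map.items.filter (fun kv => 1 < kv.2.length)

-- ===== PORT B =====
def find_duplicate_keys_alt (sets : List (String × List (String × String))) : List (String × List String) :=
  let keys : List String := PySem.List.dedup (sets.flatMap (fun s => s.2.map Prod.fst))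
  keys.filterMap (fun k =>
    let names := (sets.filter (fun s => (s.2.map Prod.fst).contains k)).map Prod.fst
    if 1 < names.length then some (k, names) else none)

-- ===== PRECONDITION & SPEC =====
-- Pre_ excludes association lists in which some env has duplicate keys: such a list does not represent a
-- Python dict (every Python input satisfies Pre_), and the per-env duplicate multiplicity A's grouping would see is accidental.
def Pre_find_duplicate_keys (sets : List (String × List (String × String))) : Prop :=
  ∀ s ∈ sets, (s.2.map Prod.fst).Nodup
instance (sets : List (String × List (String × String))) : Decidable (Pre_find_duplicate_keys sets) := by unfold Pre_find_duplicate_keys; infer_instance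

def pvWitness_find_duplicate_keys : (List (String × List (String × String))) :=
  [("a", [("k", "1"), ("x", "2")]), ("b", [("k", "3")])]

def Spec_find_duplicate_keys (sets : List (String × List (String × String))) (out : List (String × List String)) : Prop := out = find_duplicate_keys_alt sets
instance (sets : List (String × List (String × String))) (out : List (String × List String)) : Decidable (Spec_find_duplicate_keys sets out) := by unfold Spec_find_duplicate_keys; infer_instance

-- ===== CLAIM (what is proved, stated in full; the proofs are below) =====
def Claim_equal_find_duplicate_keys : Prop := ∀ (sets : List (String × List (String × String))), Dom_find_duplicate_keys sets → Pre_find_duplicate_keys sets → Spec_find_duplicate_keys sets (find_duplicate_keys sets)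

-- ===== LEMMAS AND PROOFS =====

-- the flattened (key, set_name) stream A's nested loops process
def pvStream (sets : List (String × List (String × String))) : List (String × String) :=
  sets.flatMap (fun s => s.2.map (fun kv => (kv.1, s.1)))

lemma pvKeyMap_eq (sets : List (String × List (String × String)))
    (d : PySem.Dict String (List String)) :
    sets.foldl (fun km s =>
      s.2.foldl (fun km kv => km.modify kv.1 [] (fun l => l ++ [s.1])) km) d
    = (pvStream sets).foldl (fun km p => km.modify p.1 [] (fun l => l ++ [p.2])) d := by
  induction sets generalizing d with
  | nil => rfl
  | cons s rest ih =>
    simp only [List.foldl_cons, pvStream, List.flatMap_cons, List.foldl_append, List.foldl_map]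
    exact ih _

lemma pvOneSet (name k : String) (env : List (String × String))
    (h : (env.map Prod.fst).Nodup) :
    ((env.map (fun kv => (kv.1, name))).filter (fun p => p.1 == k)).map Prod.snd
    = if (env.map Prod.fst).contains k then [name] else [] := by
  induction env with
  | nil => simp
  | cons kv env ih =>
    simp only [List.map_cons, List.nodup_cons] at h ⊢
    by_cases hk : kv.1 = k
    · subst hk
      simp only [List.filter_cons, beq_self_eq_true, List.map_cons,
        List.contains_cons, Bool.true_or, if_true]
      have : (env.map Prod.fst).contains kv.1 = false := by
        simpa [List.contains_eq_any_beq, List.any_eq_false] using h.1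
      rw [ih h.2, this]
      simp
    · have hbe : (kv.1 == k) = false := beq_eq_false_iff_ne.mpr hk
      have hbe' : (k == kv.1) = false := beq_eq_false_iff_ne.mpr (Ne.symm hk)
      rw [List.filter_cons, if_neg (by simp [hbe])]
      simp only [List.contains_cons, hbe', Bool.false_or]
      exact ih h.2

lemma pvNames_eq (sets : List (String × List (String × String)))
    (hpre : ∀ s ∈ sets, (s.2.map Prod.fst).Nodup) (k : String) :
    ((pvStream sets).filter (fun p => p.1 == k)).map Prod.snd
    = (sets.filter (fun s => (s.2.map Prod.fst).contains k)).map Prod.fst := by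
  induction sets with
  | nil => rfl
  | cons s rest ih =>
    have hs := hpre s (List.mem_cons_self ..)
    have hrest : ∀ t ∈ rest, (t.2.map Prod.fst).Nodup := fun t ht => hpre t (List.mem_cons_of_mem _ ht)
    simp only [pvStream, List.flatMap_cons, List.filter_append, List.map_append]
    rw [show ((s.2.map (fun kv => (kv.1, s.1))).filter (fun p => p.1 == k)).map Prod.snd
          = if (s.2.map Prod.fst).contains k then [s.1] else [] from pvOneSet s.1 k s.2 hs]
    simp only [List.filter_cons]
    by_cases hc : (s.2.map Prod.fst).contains k
    · rw [if_pos hc, if_pos (by simpa using hc), List.map_cons]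
      exact congrArg (s.1 :: ·) (ih hrest)
    · rw [if_neg hc, if_neg (by simpa using hc), List.nil_append]
      exact ih hrest

lemma pvFilterMap_of_map {α β : Type} (l : List α) (f : α → β) (p : β → Bool) :
    (l.map f).filter p = l.filterMap (fun a => if p (f a) then some (f a) else none) := by
  induction l with
  | nil => rfl
  | cons a l ih =>
    simp only [List.map_cons, List.filter_cons, List.filterMap_cons]
    by_cases h : p (f a) <;> simp [h, ih]

-- ===== VERDICT (by name: the statement is the Claim_ definition above) =====
theorem find_duplicate_keys_spec : Claim_equal_find_duplicate_keys := by
  intro sets _hdom hpre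
  show find_duplicate_keys sets = find_duplicate_keys_alt sets
  have hA : find_duplicate_keys sets
      = ((pvStream sets).foldl (fun km p => km.modify p.1 [] (fun l => l ++ [p.2]))
          PySem.Dict.empty).items.filter (fun kv => 1 < kv.2.length) := by
    unfold find_duplicate_keys
    rw [pvKeyMap_eq]
  have hB : find_duplicate_keys_alt sets
      = (PySem.List.dedup (sets.flatMap (fun s => s.2.map Prod.fst))).filterMap (fun k =>
          let names := (sets.filter (fun s => (s.2.map Prod.fst).contains k)).map Prod.fst
          if 1 < names.length then some (k, names) else none) := rfl
  rw [hA, hB]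
  set L := pvStream sets with hL
  have hnd : ((L.foldl (fun km p => km.modify p.1 [] (fun l => l ++ [p.2])) PySem.Dict.empty).keys).Nodup :=
    PySem.Dict.nodup_keys_foldl_modify_key L Prod.fst [] (fun _ p l => l ++ [p.2])
      PySem.Dict.empty PySem.Dict.nodup_keys_empty
  have hkeys : (L.foldl (fun km p => km.modify p.1 [] (fun l => l ++ [p.2])) PySem.Dict.empty).keys
      = PySem.Set.ofList (L.map Prod.fst) := by
    rw [PySem.Dict.keys_foldl_modify_key]
    simp [PySem.Set.update, PySem.Set.ofList_eq_foldl, PySem.Dict.keys_empty]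
  have hget : ∀ k, (L.foldl (fun km p => km.modify p.1 [] (fun l => l ++ [p.2])) PySem.Dict.empty).getD k []
      = (L.filter (fun p => p.1 == k)).map Prod.snd := by
    intro k
    rw [PySem.Dict.getD_foldl_modify_append]
    simp [PySem.Dict.getD_empty]
  rw [PySem.Dict.items_eq_map_keys _ hnd [], hkeys]
  have hK : L.map Prod.fst = sets.flatMap (fun s => s.2.map Prod.fst) := by
    simp [hL, pvStream, List.map_flatMap, Function.comp_def]
  rw [PySem.List.dedup_eq_ofList, ← hK]
  rw [pvFilterMap_of_map]
  apply List.filterMap_congr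
  intro k _
  rw [hget k, hL, pvNames_eq sets hpre k]
  simp
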